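-- pv_equiv track=rewrite | github.com/nealholt/python_programming_curricula | CS2/1400_snake/snake_cal_boye_lynn.py | clipList
-- ===== SOURCE A (Python) =====
-- def clipList(li, des_length):
--     #Clips a given list, here a list of positions, to a given goal number.
--     #Takes in the list and the goal number, and returns a list with the
--     #goal number's worth of positions.
--     if des_length > len(li):
--         des_length = len(li)
--
--     temp_list = []
--     temp_list_two = []
--     temp_list_three = []
--
--     for i in range(len(li)):
--         temp_list.append(li[len(li) - 1 - i])
--
--     for i in range(des_length):
--         temp_list_two.append(temp_list[i])
--
--     for i in range(len(temp_list_two)):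
--         temp_list_three.append(temp_list_two[len(temp_list_two) - 1 - i])
--
--     return temp_list_three
-- ===== SOURCE B (Python) =====
-- def clipList(li, des_length):
--     # Same clamp as A, then one slice: the last des_length elements.
--     if des_length > len(li):
--         des_length = len(li)
--     return li[len(li) - des_length:]
-- ===== Notes on version B (the rewrite author's own statement) =====
-- stated objective: simpler
-- what changed: Replaces A's three index-driven list-building loops (reverse, take-prefix, reverse again) with the clamp plus a single tail slice li[len(li)-des_length:].
import Mathlib
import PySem

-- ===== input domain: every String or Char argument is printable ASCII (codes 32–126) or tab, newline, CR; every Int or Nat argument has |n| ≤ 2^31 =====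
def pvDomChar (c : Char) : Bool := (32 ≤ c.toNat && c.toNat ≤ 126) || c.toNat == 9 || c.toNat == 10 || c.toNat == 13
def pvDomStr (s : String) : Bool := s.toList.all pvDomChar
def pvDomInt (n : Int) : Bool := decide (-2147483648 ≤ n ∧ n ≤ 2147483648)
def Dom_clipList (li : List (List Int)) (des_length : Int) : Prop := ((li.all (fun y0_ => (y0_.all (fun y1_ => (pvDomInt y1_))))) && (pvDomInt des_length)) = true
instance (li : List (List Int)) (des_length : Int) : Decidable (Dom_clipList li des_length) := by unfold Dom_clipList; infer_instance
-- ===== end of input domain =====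

-- B replaces A's three list-building loops (reverse, prefix, reverse) with the clamp plus one tail slice (simpler).
-- ===== PORT A =====
-- pyGetD is exact here: every index A forms lies in range, so Python never raises.
def clipList (li : List (List Int)) (des_length : Int) : List (List Int) :=
  let des_length := if des_length > (li.length : Int) then (li.length : Int) else des_length
  let temp_list := (PySem.List.pyRange 0 (li.length : Int) 1).foldl
    (fun acc i => acc ++ [PySem.List.pyGetD li ((li.length : Int) - 1 - i) []]) []
  let temp_list_two := (PySem.List.pyRange 0 des_length 1).foldl
    (fun acc i => acc ++ [PySem.List.pyGetD temp_list i []]) []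
  let temp_list_three := (PySem.List.pyRange 0 (temp_list_two.length : Int) 1).foldl
    (fun acc i => acc ++ [PySem.List.pyGetD temp_list_two ((temp_list_two.length : Int) - 1 - i) []]) []
  temp_list_three

-- ===== PORT B =====
def clipList_alt (li : List (List Int)) (des_length : Int) : List (List Int) :=
  let des_length := if des_length > (li.length : Int) then (li.length : Int) else des_length
  PySem.List.slice li (some ((li.length : Int) - des_length)) none

-- ===== PRECONDITION & SPEC =====
def Spec_clipList (li : List (List Int)) (des_length : Int) (out : List (List Int)) : Prop := out = clipList_alt li des_length
instance (li : List (List Int)) (des_length : Int) (out : List (List Int)) : Decidable (Spec_clipList li des_length out) := by unfold Spec_clipList; infer_instance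

-- ===== CLAIM (what is proved, stated in full; the proofs are below) =====
def Claim_equal_clipList : Prop := ∀ (li : List (List Int)) (des_length : Int), Dom_clipList li des_length → Spec_clipList li des_length (clipList li des_length)

-- ===== LEMMAS AND PROOFS =====

-- ===== VERDICT (by name: the statement is the Claim_ definition above) =====
-- loop 'append xs[len-1-i]' over range(len xs) builds xs.reverse
theorem map_range_rev {α : Type} (xs : List α) (d : α) :
    (PySem.List.pyRange 0 (xs.length : Int) 1).map
      (fun i => PySem.List.pyGetD xs ((xs.length : Int) - 1 - i) d) = xs.reverse := by
  rw [PySem.List.pyRange_one, List.map_map]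
  apply List.ext_getElem
  · simp
  · intro k h1 h2
    simp only [List.getElem_map, List.getElem_range, Function.comp_apply]
    have hk : k < xs.length := by simpa using h1
    have : ((xs.length : Int) - 1 - (0 + (k : Int))) = ((xs.length - 1 - k : Nat) : Int) := by
      push_cast; omega
    rw [this, PySem.List.pyGetD_natCast, List.getD_eq_getElem _ _ (by omega),
        List.getElem_reverse]

-- loop 'append xs[i]' over range(m), m ≤ len xs, builds the prefix take m
theorem map_range_take {α : Type} (xs : List α) (d : α) (m : Int) (hm : m ≤ (xs.length : Int)) :
    (PySem.List.pyRange 0 m 1).map (fun i => PySem.List.pyGetD xs i d) = xs.take m.toNat := by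
  rw [PySem.List.pyRange_one, List.map_map]
  apply List.ext_getElem
  · simp; omega
  · intro k h1 h2
    simp only [List.getElem_map, List.getElem_range, Function.comp_apply]
    have hk : k < m.toNat := by simpa using h1
    have : ((0 : Int) + (k : Int)) = ((k : Nat) : Int) := by push_cast; omega
    rw [this, PySem.List.pyGetD_natCast, List.getD_eq_getElem _ _ (by omega),
        List.getElem_take]

theorem clipList_spec : Claim_equal_clipList := by
  intro li des_length _
  unfold Spec_clipList clipList clipList_alt
  simp only [PySem.List.foldl_append_singleton_eq_map, List.nil_append]
  set d := if des_length > (li.length : Int) then (li.length : Int) else des_length with hd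
  have hdle : d ≤ (li.length : Int) := by rw [hd]; split <;> omega
  rw [map_range_rev, map_range_take _ _ _ (by simpa using hdle), map_range_rev,
      PySem.List.slice_from li (by omega)]
  rw [List.take_reverse, List.reverse_reverse]
  by_cases h0 : 0 ≤ d
  · congr 1
    omega
  · rw [List.drop_eq_nil_of_le (by omega), List.drop_eq_nil_of_le (by omega)]
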